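-- pv_equiv track=rewrite | github.com/lidofinance/depositor-bot | src/bots/depositor.py | _take_until_first_healthy_module
-- ===== SOURCE A (Python) =====
-- from typing import Callable, Dict, List, Optional, Tuple, cast
--
-- def _take_until_first_healthy_module(
--     sorted_modules_healthiness: list[Tuple[int, bool]],
-- ) -> list[int]:
--     module_ids = []
--     for module_id, is_healthy in sorted_modules_healthiness:
--         module_ids.append(module_id)
--         if is_healthy:
--             break
--     else:
--         # If all modules are unhealthy
--         return []
--     return module_ids
-- ===== SOURCE B (Python) =====
-- def _take_until_first_healthy_module(
--     sorted_modules_healthiness: list,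
-- ) -> list:
--     idx = next((i for i, (_mid, healthy) in enumerate(sorted_modules_healthiness) if healthy), None)
--     if idx is None:
--         return []
--     return [module_id for module_id, _ in sorted_modules_healthiness[:idx + 1]]
-- ===== Notes on version B (the rewrite author's own statement) =====
-- stated objective: simpler
-- what changed: Replaced the accumulate-with-break for/else loop by a locate-the-first-healthy-index step followed by a slice-and-project of the prefix up to and including it.
import Mathlib
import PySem

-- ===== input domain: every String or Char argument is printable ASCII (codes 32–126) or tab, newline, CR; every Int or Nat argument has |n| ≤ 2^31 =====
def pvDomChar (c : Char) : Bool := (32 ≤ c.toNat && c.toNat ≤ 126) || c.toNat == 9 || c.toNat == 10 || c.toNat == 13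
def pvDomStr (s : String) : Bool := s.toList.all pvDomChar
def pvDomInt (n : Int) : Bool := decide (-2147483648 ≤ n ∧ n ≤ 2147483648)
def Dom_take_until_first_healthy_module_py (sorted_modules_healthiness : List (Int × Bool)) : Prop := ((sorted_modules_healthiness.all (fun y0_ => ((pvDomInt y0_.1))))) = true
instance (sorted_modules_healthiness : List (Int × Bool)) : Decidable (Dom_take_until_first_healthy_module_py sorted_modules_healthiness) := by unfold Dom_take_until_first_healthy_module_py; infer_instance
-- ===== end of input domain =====

-- B replaces A's accumulate-with-break for/else loop by find-first-healthy-index then slice+project (objective: simpler).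

-- ===== PORT A =====
-- the for/else loop: accumulate module_ids, break at the first healthy module; if the loop
-- finishes without break (no healthy module) the else-branch returns [].
def takeUntilGo (acc : List Int) : List (Int × Bool) → List Int
  | [] => []  -- for/else: no break happened, return []
  | (module_id, is_healthy) :: rest =>
      let acc' := acc ++ [module_id]
      if is_healthy then acc' else takeUntilGo acc' rest

def take_until_first_healthy_module_py (sorted_modules_healthiness : List (Int × Bool)) : List Int :=
  takeUntilGo [] sorted_modules_healthiness

-- ===== PORT B =====
def take_until_first_healthy_module_py_alt (sorted_modules_healthiness : List (Int × Bool)) : List Int :=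
  match sorted_modules_healthiness.findIdx? (fun p => p.2) with
  | none => []
  | some i => (PySem.List.slice sorted_modules_healthiness none (some ((i : Int) + 1))).map Prod.fst

-- ===== PRECONDITION & SPEC =====
def Spec_take_until_first_healthy_module_py (sorted_modules_healthiness : List (Int × Bool)) (out : List Int) : Prop := out = take_until_first_healthy_module_py_alt sorted_modules_healthiness
instance (sorted_modules_healthiness : List (Int × Bool)) (out : List Int) : Decidable (Spec_take_until_first_healthy_module_py sorted_modules_healthiness out) := by unfold Spec_take_until_first_healthy_module_py; infer_instance

-- ===== CLAIM (what is proved, stated in full; the proofs are below) =====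
def Claim_equal_take_until_first_healthy_module_py : Prop := ∀ (sorted_modules_healthiness : List (Int × Bool)), Dom_take_until_first_healthy_module_py sorted_modules_healthiness → Spec_take_until_first_healthy_module_py sorted_modules_healthiness (take_until_first_healthy_module_py sorted_modules_healthiness)

-- ===== LEMMAS AND PROOFS =====
theorem takeUntilGo_eq (l : List (Int × Bool)) : ∀ acc : List Int,
    takeUntilGo acc l =
      match l.findIdx? (fun p => p.2) with
      | none => []
      | some i => acc ++ (l.take (i + 1)).map Prod.fst := by
  induction l with
  | nil => intro acc; simp [takeUntilGo]
  | cons hd tl ih =>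
      intro acc
      obtain ⟨mid, h⟩ := hd
      by_cases hh : h
      · simp [takeUntilGo, hh, List.findIdx?_cons]
      · simp only [takeUntilGo, hh, if_false, List.findIdx?_cons, Bool.false_eq_true]
        rw [ih]
        cases htl : tl.findIdx? (fun p => p.2) with
        | none => simp
        | some i => simp [List.take_succ_cons]

-- ===== VERDICT (by name: the statement is the Claim_ definition above) =====
theorem take_until_first_healthy_module_py_spec : Claim_equal_take_until_first_healthy_module_py := by
  intro l _
  unfold Spec_take_until_first_healthy_module_py take_until_first_healthy_module_py take_until_first_healthy_module_py_alt
  rw [takeUntilGo_eq]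
  cases hf : l.findIdx? (fun p => p.2) with
  | none => simp
  | some i =>
      simp only [List.nil_append]
      congr 1
      have : ((i : Int) + 1) = ((i + 1 : Nat) : Int) := by push_cast; ring
      rw [this, PySem.List.slice_to_natCast]
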